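-- pv_equiv track=rewrite | github.com/ignacioDanGarcia/utnfoBack | EvaluadorConflictos.py | evaluar_conflictos
-- ===== SOURCE A (Python) =====
-- def evaluar_conflictos(asignacion, alumnos_materias):
--     conflictos = 0
--
--     # Procesamos cada alumno y su materia
--     for alumno, materia in alumnos_materias:
--         # Buscar en qué día está asignada la materia del alumno
--         dia_materia = None
--         for dia, materias in asignacion.items():
--             if materia in materias:
--                 dia_materia = dia
--                 break
--
--         # Si encontramos que la materia está asignada, verificamos los demás registros del alumno
--         if dia_materia is not None:
--             # Buscar otras materias que ese alumno tiene
--             otras_materias = [materia_b for alumno_b, materia_b in alumnos_materias if alumno_b == alumno and materia_b != materia]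
--
--             # Verificamos si alguna de esas otras materias está asignada en el mismo día
--             for otra_materia in otras_materias:
--                 for dia, materias in asignacion.items():
--                     if otra_materia in materias and dia == dia_materia:
--                         conflictos += 1
--
--     return round(conflictos / 2)
-- ===== SOURCE B (Python) =====
-- def evaluar_conflictos(asignacion, alumnos_materias):
--     # Index: materia -> set of materias of the FIRST day that contains it.
--     primer_dia_set = {}
--     for materias in asignacion.values():
--         s = set(materias)
--         for m in materias:
--             primer_dia_set.setdefault(m, s)
--     # Group each student's subjects.
--     por_alumno = {}
--     for alumno, materia in alumnos_materias:
--         por_alumno.setdefault(alumno, []).append(materia)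
--     doble = 0
--     for alumno, materia in alumnos_materias:
--         s = primer_dia_set.get(materia)
--         if s is not None:
--             doble += sum(1 for m2 in por_alumno[alumno] if m2 != materia and m2 in s)
--     return round(doble / 2)
-- ===== Notes on version B (the rewrite author's own statement) =====
-- stated objective: faster
-- what changed: B precomputes once a materia->first-day-subject-set index and a per-student grouping of records, then counts each record's same-day partners inside its own student's group, instead of A's per-record scans over the whole assignment (twice) and over the entire record list.
import Mathlib
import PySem

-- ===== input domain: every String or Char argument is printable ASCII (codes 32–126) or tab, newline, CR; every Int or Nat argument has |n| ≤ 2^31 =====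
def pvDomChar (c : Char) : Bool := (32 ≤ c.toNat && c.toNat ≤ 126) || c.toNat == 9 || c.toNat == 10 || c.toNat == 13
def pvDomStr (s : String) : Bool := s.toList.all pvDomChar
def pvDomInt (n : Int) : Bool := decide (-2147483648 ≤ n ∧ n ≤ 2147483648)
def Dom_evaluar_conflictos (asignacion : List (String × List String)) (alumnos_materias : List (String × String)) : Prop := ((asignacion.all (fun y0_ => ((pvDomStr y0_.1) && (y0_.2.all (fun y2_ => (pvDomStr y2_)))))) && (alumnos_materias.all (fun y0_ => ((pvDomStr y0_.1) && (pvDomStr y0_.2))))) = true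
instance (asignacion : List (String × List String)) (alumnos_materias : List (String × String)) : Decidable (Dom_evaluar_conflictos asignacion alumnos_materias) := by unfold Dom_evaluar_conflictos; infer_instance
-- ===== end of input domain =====

-- ===== PORT A =====
-- B replaces A's per-record scans of the whole assignment and record list by indexes built once (objective: faster).
-- round(c / 2) for an integer c: Python's round, ties to even (used by both Pythons' final 'return round(conflictos / 2)')
def pvRoundHalf (c : Int) : Int :=
  if PySem.Int.mod c 2 = 0 then PySem.Int.floordiv c 2
  else if PySem.Int.mod (PySem.Int.floordiv c 2) 2 = 0 then PySem.Int.floordiv c 2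
  else PySem.Int.floordiv c 2 + 1

-- A's first inner loop: first dia whose materias contain m (the 'break' loop)
def pvFindDia : List (String × List String) → String → Option String
  | [], _ => none
  | (dia, materias) :: rest, m =>
    if materias.contains m then some dia else pvFindDia rest m

def evaluar_conflictos (asignacion : List (String × List String)) (alumnos_materias : List (String × String)) : Int :=
  let conflictos : Int := alumnos_materias.foldl (fun conflictos p =>
    match pvFindDia asignacion p.2 with
    | none => conflictos
    | some dia_materia =>
      let otras_materias := alumnos_materias.filterMap
        (fun q => if q.1 == p.1 && q.2 != p.2 then some q.2 else none)
      otras_materias.foldl (fun c otra =>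
        asignacion.foldl (fun c2 dp =>
          if dp.2.contains otra && dp.1 == dia_materia then c2 + 1 else c2) c) conflictos) 0
  pvRoundHalf conflictos

-- ===== PORT B =====
-- Source B: primer_dia_set — materia -> set(materias) of the first day containing it (setdefault never overwrites)
def pvPrimerDiaSet (asignacion : List (String × List String)) : PySem.Dict String (List String) :=
  asignacion.foldl (fun d p =>
    let s := PySem.Set.ofList p.2
    p.2.foldl (fun d m => d.setdefault m s) d) PySem.Dict.empty

def evaluar_conflictos_alt (asignacion : List (String × List String)) (alumnos_materias : List (String × String)) : Int :=
  let primer := pvPrimerDiaSet asignacion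
  -- por_alumno.setdefault(al, []).append(m)  ==  por_alumno[al] = por_alumno.get(al, []) + [m]  (Dict.modify)
  let por_alumno := alumnos_materias.foldl
    (fun d p => d.modify p.1 [] (fun l => l ++ [p.2])) PySem.Dict.empty
  let doble : Int := alumnos_materias.foldl (fun acc p =>
    match primer.get? p.2 with
    | none => acc
    | some s =>
      acc + ((por_alumno.getD p.1 []).countP (fun m2 => m2 != p.2 && s.contains m2) : Int)) 0
  pvRoundHalf doble

-- ===== PRECONDITION & SPEC =====
-- A's 'asignacion' is a Python dict, which can never hold two equal day keys; Pre_ only rules out duplicate-key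
-- association lists, which the assoc-list encoding admits but no Python call can produce.
def Pre_evaluar_conflictos (asignacion : List (String × List String)) (alumnos_materias : List (String × String)) : Prop :=
  (asignacion.map Prod.fst).Nodup
instance (asignacion : List (String × List String)) (alumnos_materias : List (String × String)) : Decidable (Pre_evaluar_conflictos asignacion alumnos_materias) := by unfold Pre_evaluar_conflictos; infer_instance

def pvWitness_evaluar_conflictos : (List (String × List String)) × (List (String × String)) :=
  ([("lunes", ["M1", "M2"]), ("martes", ["M3"])], [("ana", "M1"), ("ana", "M2"), ("bob", "M3")])

def Spec_evaluar_conflictos (asignacion : List (String × List String)) (alumnos_materias : List (String × String)) (out : Int) : Prop := out = evaluar_conflictos_alt asignacion alumnos_materias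
instance (asignacion : List (String × List String)) (alumnos_materias : List (String × String)) (out : Int) : Decidable (Spec_evaluar_conflictos asignacion alumnos_materias out) := by unfold Spec_evaluar_conflictos; infer_instance

-- ===== CLAIM (what is proved, stated in full; the proofs are below) =====
def Claim_equal_evaluar_conflictos : Prop := ∀ (asignacion : List (String × List String)) (alumnos_materias : List (String × String)), Dom_evaluar_conflictos asignacion alumnos_materias → Pre_evaluar_conflictos asignacion alumnos_materias → Spec_evaluar_conflictos asignacion alumnos_materias (evaluar_conflictos asignacion alumnos_materias)

-- ===== LEMMAS AND PROOFS =====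

theorem pvFindDia_eq_find? (asig : List (String × List String)) (m : String) :
    pvFindDia asig m = (asig.find? (fun q => q.2.contains m)).map Prod.fst := by
  induction asig with
  | nil => rfl
  | cons hd tl ih =>
    obtain ⟨dia, materias⟩ := hd
    by_cases h : m ∈ materias
    · simp [pvFindDia, List.find?, h]
    · simp [pvFindDia, List.find?, h, ih]

theorem pv_setdefault_eq {κ ν : Type} [BEq κ] [LawfulBEq κ] (d : PySem.Dict κ ν) (k : κ) (v : ν) :
    d.setdefault k v = if d.contains k then d else d.insert k v := by
  split
  · simp [PySem.Dict.setdefault, *]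
  · apply PySem.Dict.ext
    simp [PySem.Dict.setdefault, *, PySem.Dict.items_insert_of_not_contains]

theorem pv_get?_setdefault {κ ν : Type} [BEq κ] [LawfulBEq κ] [DecidableEq κ] (d : PySem.Dict κ ν) (k k' : κ) (v : ν) :
    (d.setdefault k v).get? k' = if k' = k ∧ d.get? k = none then some v else d.get? k' := by
  rw [pv_setdefault_eq]
  by_cases hc : d.contains k
  · have : d.get? k ≠ none := by
      rw [PySem.Dict.contains_eq_isSome_get?] at hc
      exact Option.isSome_iff_ne_none.mp hc
    simp [hc, this]
  · have hn : d.get? k = none := by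
      rw [PySem.Dict.contains_eq_isSome_get?] at hc
      simpa using hc
    rw [if_neg (by simp [hc]), PySem.Dict.get?_insert]
    by_cases hk : k' = k <;> simp [hk, hn]

theorem pv_inner_setdefault (s : List String) :
    ∀ (ms : List String) (d : PySem.Dict String (List String)) (m : String),
    (ms.foldl (fun d x => d.setdefault x s) d).get? m
      = if m ∈ ms ∧ d.get? m = none then some s else d.get? m := by
  intro ms
  induction ms with
  | nil => simp
  | cons x tl ih =>
    intro d m
    simp only [List.foldl_cons, ih, pv_get?_setdefault]
    by_cases hmx : m = x
    · subst hmx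
      by_cases hn : d.get? m = none <;> simp [hn]
    · by_cases hmem : m ∈ tl <;> simp [hmx, hmem]

theorem pvPrimerDiaSet_get? (asig : List (String × List String)) (m : String) :
    (pvPrimerDiaSet asig).get? m
      = (asig.find? (fun q => q.2.contains m)).map (fun q => PySem.Set.ofList q.2) := by
  unfold pvPrimerDiaSet
  suffices h : ∀ (l : List (String × List String)) (d : PySem.Dict String (List String)),
      (l.foldl (fun d p => p.2.foldl (fun d m => d.setdefault m (PySem.Set.ofList p.2)) d) d).get? m
        = ((d.get? m).or ((l.find? (fun q => q.2.contains m)).map (fun q => PySem.Set.ofList q.2))) by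
    simpa using h asig PySem.Dict.empty
  intro l
  induction l with
  | nil => simp
  | cons hd tl ih =>
    intro d
    obtain ⟨dia, ms⟩ := hd
    simp only [List.foldl_cons, ih, pv_inner_setdefault, List.find?]
    by_cases hm : m ∈ ms
    · cases hget : d.get? m <;> simp [hm]
    · cases hget : d.get? m <;> simp [hm]

theorem pv_countP_unique_key (otra : String) (dm : String) (ms : List String) :
    ∀ (asig : List (String × List String)), (asig.map Prod.fst).Nodup → (dm, ms) ∈ asig →
    asig.countP (fun dp => dp.2.contains otra && dp.1 == dm)
      = if ms.contains otra then 1 else 0 := by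
  intro asig
  induction asig with
  | nil => simp
  | cons hd tl ih =>
    intro hnd hmem
    have hnd' : (tl.map Prod.fst).Nodup := (List.nodup_cons.mp hnd).2
    have hhd : hd.1 ∉ tl.map Prod.fst := (List.nodup_cons.mp hnd).1
    rcases List.mem_cons.mp hmem with h | h
    · subst h
      have hz : tl.countP (fun dp => dp.2.contains otra && dp.1 == dm) = 0 := by
        apply List.countP_eq_zero.mpr
        intro q hq hpq
        simp only [Bool.and_eq_true, beq_iff_eq] at hpq
        have hmm : q.1 ∈ List.map Prod.fst tl := List.mem_map_of_mem (f := Prod.fst) hq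
        rw [hpq.2] at hmm
        exact hhd hmm
      rw [List.countP_cons, hz]
      simp
    · have hne : hd.1 ≠ dm := fun he => hhd (he ▸ List.mem_map_of_mem (f := Prod.fst) h)
      rw [List.countP_cons, ih hnd' h]
      simp [hne]

theorem pv_otras_eq (l : List (String × String)) (al m : String) :
    l.filterMap (fun q => if q.1 == al && q.2 != m then some q.2 else none)
      = ((l.filter (fun q => q.1 == al)).map Prod.snd).filter (fun x => x != m) := by
  induction l with
  | nil => rfl
  | cons hd tl ih =>
    simp only [List.filterMap_cons, List.filter_cons]
    by_cases h1 : hd.1 = al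
    · by_cases h2 : hd.2 = m
      · simpa [h1, h2] using ih
      · simpa [h1, h2] using ih
    · simpa [h1] using ih

-- per-record agreement of the two loop bodies, under Nodup day keys
theorem pv_step_eq (asig : List (String × List String)) (ams : List (String × String))
    (hnd : (asig.map Prod.fst).Nodup) (acc : Int) (p : String × String) :
    (match pvFindDia asig p.2 with
     | none => acc
     | some dia_materia =>
       (ams.filterMap (fun q : String × String => if q.1 == p.1 && q.2 != p.2 then some q.2 else none)).foldl
         (fun c otra => asig.foldl (fun c2 (dp : String × List String) =>
            if dp.2.contains otra && dp.1 == dia_materia then c2 + 1 else c2) c) acc)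
    = (match (pvPrimerDiaSet asig).get? p.2 with
       | none => acc
       | some s => acc +
          (((ams.foldl (fun (d : PySem.Dict String (List String)) (q : String × String) => d.modify q.1 [] (fun l => l ++ [q.2])) PySem.Dict.empty).getD p.1 []).countP
             (fun m2 => m2 != p.2 && s.contains m2) : Int)) := by
  rw [pvFindDia_eq_find?, pvPrimerDiaSet_get?]
  cases hfind : asig.find? (fun q => q.2.contains p.2) with
  | none => simp
  | some q =>
    obtain ⟨dm, ms⟩ := q
    have hmem : (dm, ms) ∈ asig := List.mem_of_find?_eq_some hfind
    simp only [Option.map_some]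
    -- inner A loop = counting, collapsed by uniqueness of the key dm
    have hinner : ∀ (otra : String) (c : Int),
        asig.foldl (fun c2 dp => if dp.2.contains otra && dp.1 == dm then c2 + 1 else c2) c
          = c + (if ms.contains otra then 1 else 0) := by
      intro otra c
      rw [PySem.List.foldl_count_if, pv_countP_unique_key otra dm ms asig hnd hmem]
      by_cases h : otra ∈ ms <;> simp [h]
    -- A's middle loop becomes a countP over otras
    have houter : ∀ (otras : List String) (c : Int),
        otras.foldl (fun c otra => asig.foldl (fun c2 dp =>
            if dp.2.contains otra && dp.1 == dm then c2 + 1 else c2) c) c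
          = c + (otras.countP (fun otra => ms.contains otra) : Int) := by
      intro otras c
      rw [PySem.List.foldl_congr_mem otras _
            (fun c otra => if ms.contains otra then c + 1 else c) c
            (by intro c2 otra _; rw [hinner]; by_cases h : otra ∈ ms <;> simp [h])]
      exact PySem.List.foldl_count_if _ otras c
    rw [houter, pv_otras_eq, PySem.Dict.getD_foldl_modify_append, PySem.Dict.getD_empty,
        List.nil_append]
    have hcount :
        ((((ams.filter (fun q => q.1 == p.1)).map Prod.snd).filter (fun x => x != p.2)).countP
            (fun otra => ms.contains otra))
          = ((ams.filter (fun q => q.1 == p.1)).map Prod.snd).countP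
              (fun m2 => m2 != p.2 && (PySem.Set.ofList ms).contains m2) := by
      rw [List.countP_filter]
      apply List.countP_congr
      intro x hx
      simp [Bool.and_comm]
    rw [hcount]
    rfl

-- ===== VERDICT (by name: the statement is the Claim_ definition above) =====
theorem evaluar_conflictos_spec : Claim_equal_evaluar_conflictos := by
  intro asig ams _ hnd
  unfold Spec_evaluar_conflictos evaluar_conflictos evaluar_conflictos_alt
  simp only []
  congr 1
  refine PySem.List.foldl_congr_mem ams _ _ 0 ?_
  intro acc p _
  exact pv_step_eq asig ams hnd acc p
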